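-- pv_equiv track=rewrite | github.com/szubrilina/TextGeneration | Trash/TextGeneration_2.py | calculate_n_tokens
-- ===== SOURCE A (Python) =====
-- def get_string(list):
--     str = ""
--     for item in list:
--         str = str + item + ' '
--
--     str = str.rstrip(" ")
--     return str
--
-- def calculate_n_tokens(depth, tokens_list, probabilities):
--
--     current = []
--
--     for item in tokens_list:
--         current.append(item)
--
--         if len(current) < depth:
--             continue
--
--         str = get_string(current[:-1:])
--
--         if probabilities.get(str, None) is None:
--             probabilities[str] = dict()
--
--         if probabilities[str].get(item, None) is None:
--             probabilities[str][item] = 0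
--
--         probabilities[str][item] += 1
--
--         current = current[1::]
--
--     return probabilities
-- ===== SOURCE B (Python) =====
-- def calculate_n_tokens(depth, tokens_list, probabilities):
--     # index-based windows instead of A's running buffer; two-line nested update
--     for i in range(max(depth - 1, 0), len(tokens_list)):
--         key = ' '.join(tokens_list[i - depth + 1:i]).rstrip(' ')
--         inner = probabilities.setdefault(key, {})
--         tok = tokens_list[i]
--         inner[tok] = inner.get(tok, 0) + 1
--     return probabilities
-- ===== Notes on version B (the rewrite author's own statement) =====
-- stated objective: simpler
-- what changed: B drops A's incrementally maintained sliding buffer `current` and its create-key/create-counter/increment branch chain: it loops over indices, extracts each window directly by one slice, builds the key with a single ' '.join instead of A's per-item string concatenation loop, and updates the nested dict in two lines via setdefault and get.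
import Mathlib
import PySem

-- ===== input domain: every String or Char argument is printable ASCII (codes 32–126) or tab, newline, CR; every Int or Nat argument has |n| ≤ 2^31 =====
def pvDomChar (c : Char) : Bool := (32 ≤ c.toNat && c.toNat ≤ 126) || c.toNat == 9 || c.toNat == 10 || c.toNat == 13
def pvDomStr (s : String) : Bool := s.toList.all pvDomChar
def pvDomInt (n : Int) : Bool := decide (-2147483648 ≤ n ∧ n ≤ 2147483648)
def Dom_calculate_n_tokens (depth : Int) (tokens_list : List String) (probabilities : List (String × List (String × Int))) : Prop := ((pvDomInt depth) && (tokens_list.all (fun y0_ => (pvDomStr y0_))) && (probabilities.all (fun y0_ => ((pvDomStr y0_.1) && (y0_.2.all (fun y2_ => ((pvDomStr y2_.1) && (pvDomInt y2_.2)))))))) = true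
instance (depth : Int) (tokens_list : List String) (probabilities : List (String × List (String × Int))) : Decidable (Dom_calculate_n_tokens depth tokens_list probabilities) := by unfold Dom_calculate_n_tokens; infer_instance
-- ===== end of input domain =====

-- B replaces A's running window buffer by an index loop with direct slice extraction and a
-- setdefault-style two-line nested update; objective: simpler. Equivalence is about the RETURN
-- value: both Pythons mutate `probabilities` in place in the same way and return it.

-- shared helpers: Python str.rstrip(" ") (an explicit char set; not PySem.Str.rstrip, which
-- strips all whitespace) and the dict-of-dicts ↔ association-list bridge of the type convention
def crstrip (cs : List Char) : List Char := (cs.reverse.dropWhile (fun c => c == ' ')).reverse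

def rstripSp (s : String) : String := String.ofList (crstrip s.toList)

abbrev NProbs : Type := PySem.Dict String (PySem.Dict String Int)

def toNProbs (probabilities : List (String × List (String × Int))) : NProbs :=
  PySem.Dict.mk (probabilities.map (fun p => (p.1, PySem.Dict.mk p.2)))

def ofNProbs (d : NProbs) : List (String × List (String × Int)) :=
  d.items.map (fun p => (p.1, p.2.items))

-- ===== PORT A =====
def get_string (l : List String) : String :=
  rstripSp (l.foldl (fun str item => str ++ item ++ " ") "")

def calc_stepA (depth : Int) (st : List String × NProbs) (item : String) : List String × NProbs :=
  let current := st.1 ++ [item]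
  if (current.length : Int) < depth then (current, st.2)
  else
    let s := get_string (PySem.List.slice current none (some (-1)))
    let probs := if (st.2.get? s).isNone then st.2.insert s PySem.Dict.empty else st.2
    -- probabilities[str]: the key s is present at this point, so getD is exact
    let inner0 := probs.getD s PySem.Dict.empty
    let inner1 := if (inner0.get? item).isNone then inner0.insert item (0 : Int) else inner0
    let probs := probs.insert s (inner1.insert item (inner1.getD item 0 + 1))
    (PySem.List.slice current (some 1) none, probs)

def calculate_n_tokens (depth : Int) (tokens_list : List String) (probabilities : List (String × List (String × Int))) : List (String × List (String × Int)) :=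
  ofNProbs (tokens_list.foldl (calc_stepA depth) ([], toNProbs probabilities)).2

-- ===== PORT B =====
def calc_stepB (depth : Int) (tokens_list : List String) (d : NProbs) (i : Int) : NProbs :=
  let key := rstripSp (PySem.Str.join " " (PySem.List.slice tokens_list (some (i - depth + 1)) (some i)))
  -- tokens_list[i]: i ranges over valid indices only, so getD is exact
  let tok := (PySem.List.pyGet? tokens_list i).getD ""
  let d1 := d.setdefault key PySem.Dict.empty
  let inner := d1.getD key PySem.Dict.empty
  d1.insert key (inner.insert tok (inner.getD tok 0 + 1))

def calculate_n_tokens_alt (depth : Int) (tokens_list : List String) (probabilities : List (String × List (String × Int))) : List (String × List (String × Int)) :=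
  ofNProbs ((PySem.List.pyRange (max (depth - 1) 0) (tokens_list.length : Int) 1).foldl
    (calc_stepB depth tokens_list) (toNProbs probabilities))

-- ===== PRECONDITION & SPEC =====
def Spec_calculate_n_tokens (depth : Int) (tokens_list : List String) (probabilities : List (String × List (String × Int))) (out : List (String × List (String × Int))) : Prop := out = calculate_n_tokens_alt depth tokens_list probabilities
instance (depth : Int) (tokens_list : List String) (probabilities : List (String × List (String × Int))) (out : List (String × List (String × Int))) : Decidable (Spec_calculate_n_tokens depth tokens_list probabilities out) := by unfold Spec_calculate_n_tokens; infer_instance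

-- ===== CLAIM (what is proved, stated in full; the proofs are below) =====
def Claim_equal_calculate_n_tokens : Prop := ∀ (depth : Int) (tokens_list : List String) (probabilities : List (String × List (String × Int))), Dom_calculate_n_tokens depth tokens_list probabilities → Spec_calculate_n_tokens depth tokens_list probabilities (calculate_n_tokens depth tokens_list probabilities)

-- ===== LEMMAS AND PROOFS =====

-- the characters of A's space-appending fold
lemma foldl_sp_toList (l : List String) (a : String) :
    (l.foldl (fun str item => str ++ item ++ " ") a).toList
      = a.toList ++ (l.map (fun s => s.toList ++ [' '])).flatten := by
  induction l generalizing a with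
  | nil => simp
  | cons x t ih => simp [ih, String.toList_append]

lemma crstrip_append_space (cs : List Char) : crstrip (cs ++ [' ']) = crstrip cs := by
  simp [crstrip]

-- the space-appending fold and ' '.join differ only by one trailing space
lemma flatten_map_space (l : List String) (hne : l ≠ []) :
    (l.map (fun s => s.toList ++ [' '])).flatten
      = List.intercalate [' '] (l.map String.toList) ++ [' '] := by
  induction l with
  | nil => simp at hne
  | cons x t ih =>
    cases t with
    | nil => simp [List.intercalate]
    | cons y u =>
      calc (List.map (fun s => s.toList ++ [' ']) (x :: y :: u)).flatten
          = x.toList ++ [' '] ++ (List.map (fun s => s.toList ++ [' ']) (y :: u)).flatten := by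
            simp
        _ = x.toList ++ [' ']
              ++ (List.intercalate [' '] (List.map String.toList (y :: u)) ++ [' ']) := by
            rw [ih (by simp)]
        _ = List.intercalate [' '] (List.map String.toList (x :: y :: u)) ++ [' '] := by
            simp [List.intercalate, List.intersperse_cons₂]

-- A's key (get_string on the window) equals B's key (' '.join + rstrip)
lemma get_string_eq_join (l : List String) :
    get_string l = rstripSp (PySem.Str.join " " l) := by
  unfold get_string rstripSp
  congr 1
  rw [foldl_sp_toList, PySem.Str.toList_join]
  have h2 : PySem.Chars.join " ".toList = List.intercalate [' '] := rfl
  rw [h2, show ("".toList : List Char) = [] from rfl, List.nil_append]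
  cases l with
  | nil => simp [List.intercalate]
  | cons x t => rw [flatten_map_space _ (by simp), crstrip_append_space]

-- A's three-branch in-place update of the nested dict equals B's setdefault + get update
lemma dict_step_eq (d : NProbs) (s t : String) :
    (if (d.get? s).isNone then d.insert s PySem.Dict.empty else d).insert s ((if (((if (d.get? s).isNone then d.insert s PySem.Dict.empty else d).getD s PySem.Dict.empty).get? t).isNone then ((if (d.get? s).isNone then d.insert s PySem.Dict.empty else d).getD s PySem.Dict.empty).insert t (0 : Int) else ((if (d.get? s).isNone then d.insert s PySem.Dict.empty else d).getD s PySem.Dict.empty)).insert t ((if (((if (d.get? s).isNone then d.insert s PySem.Dict.empty else d).getD s PySem.Dict.empty).get? t).isNone then ((if (d.get? s).isNone then d.insert s PySem.Dict.empty else d).getD s PySem.Dict.empty).insert t (0 : Int) else ((if (d.get? s).isNone then d.insert s PySem.Dict.empty else d).getD s PySem.Dict.empty)).getD t 0 + 1))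
      = (d.setdefault s PySem.Dict.empty).insert s (((d.setdefault s PySem.Dict.empty).getD s PySem.Dict.empty).insert t (((d.setdefault s PySem.Dict.empty).getD s PySem.Dict.empty).getD t 0 + 1)) := by
  have hc : d.contains s = (d.get? s).isSome := PySem.Dict.contains_eq_isSome_get? d s
  cases hs : d.get? s with
  | none =>
    rw [PySem.Dict.setdefault_of_not_contains d _ (by simp [hc, hs])]
    simp only [Option.isNone_none, if_pos]
    rw [PySem.Dict.getD_insert_self]
    have he : (PySem.Dict.empty : PySem.Dict String Int).get? t = none :=
      PySem.Dict.get?_empty t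
    simp only [he, Option.isNone_none, if_pos]
    rw [PySem.Dict.getD_insert_self, PySem.Dict.getD_of_get?_eq_none _ _ he,
      PySem.Dict.insert_insert_self]
    simp [PySem.Dict.insert_insert_self]
  | some v =>
    rw [PySem.Dict.setdefault_of_contains d _ (by simp [hc, hs])]
    simp only [Option.isNone_some, Bool.false_eq_true, ite_false]
    cases ht : (d.getD s PySem.Dict.empty).get? t with
    | none =>
      simp only [Option.isNone_none, if_pos]
      rw [PySem.Dict.getD_insert_self, PySem.Dict.getD_of_get?_eq_none _ _ ht,
        PySem.Dict.insert_insert_self]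
    | some w =>
      simp only [Option.isNone_some, Bool.false_eq_true, ite_false]

-- the loop invariant: after j tokens A's buffer is the last min(j, depth-1) of the first j
-- tokens, and the rest of A's fold equals B's fold over the remaining indices
lemma loop_eq (depth : Int) (tokens : List String) :
    ∀ (k j : Nat) (probs : NProbs), tokens.length - j = k → j ≤ tokens.length →
      ((tokens.drop j).foldl (calc_stepA depth)
          ((tokens.take j).drop (j - (depth - 1).toNat), probs)).2
        = (PySem.List.pyRange (max ((depth - 1).toNat : Int) (j : Int)) (tokens.length : Int) 1).foldl
            (calc_stepB depth tokens) probs := by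
  intro k
  induction k with
  | zero =>
    intro j probs hk hj
    have hjn : j = tokens.length := by omega
    subst hjn
    rw [List.drop_length, PySem.List.pyRange_one_eq_nil (le_max_right _ _)]
    rfl
  | succ k ih =>
    intro j probs hk hj
    have hjn : j < tokens.length := by omega
    set m := (depth - 1).toNat with hm
    have hdrop : tokens.drop j = tokens[j] :: tokens.drop (j + 1) :=
      List.drop_eq_getElem_cons hjn
    set cur : List String := (tokens.take j).drop (j - m) with hcur
    have hcl : cur.length = j - (j - m) := by
      simp [hcur, List.length_drop, List.length_take]
      omega
    rw [hdrop, List.foldl_cons]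
    by_cases hskip : j + 1 ≤ m
    · -- buffer still filling: A skips, B's range start is unchanged
      have hc : ((cur ++ [tokens[j]]).length : Int) < depth := by
        simp [List.length_append, hcl]; omega
      have hbuf : cur ++ [tokens[j]] = (tokens.take (j + 1)).drop ((j + 1) - m) := by
        have h0 : j - m = 0 := by omega
        have h1 : (j + 1) - m = 0 := by omega
        rw [h1, List.drop_zero, List.take_add_one, List.getElem?_eq_getElem hjn,
          Option.toList_some, hcur, h0, List.drop_zero]
      have hr : (max ((m : Nat) : Int) ((j : Nat) : Int)) = max ((m : Nat) : Int) (((j + 1 : Nat)) : Int) := by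
        rw [max_eq_left (by exact_mod_cast (by omega : j ≤ m)),
          max_eq_left (by exact_mod_cast (by omega : j + 1 ≤ m))]
      have hA : calc_stepA depth (cur, probs) tokens[j] = (cur ++ [tokens[j]], probs) := by
        simp only [calc_stepA, if_pos hc]
      rw [hA, hbuf, hr]
      exact ih (j + 1) probs (by omega) (by omega)
    · -- window full: A processes the token; B's range contributes index j
      have hc : ¬ (((cur ++ [tokens[j]]).length : Int) < depth) := by
        simp [List.length_append, hcl]; omega
      have hcur' : cur ++ [tokens[j]] = (tokens.take (j + 1)).drop (j - m) := by
        rw [List.take_add_one, List.getElem?_eq_getElem hjn, Option.toList_some,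
          List.drop_append_of_le_length (by simp; omega), hcur]
      have hW : PySem.List.slice tokens (some ((j : Int) - depth + 1)) (some (j : Int)) = cur := by
        by_cases hd : 1 ≤ depth
        · have ha : (j : Int) - depth + 1 = ((j - m : Nat) : Int) := by omega
          rw [ha, PySem.List.slice_natCast, hcur, List.drop_take]
        · have ha : (0 : Int) ≤ (j : Int) - depth + 1 := by omega
          rw [PySem.List.slice_toNat tokens ha (by positivity)]
          have h1 : (j : Int).toNat - ((j : Int) - depth + 1).toNat = 0 := by omega
          have h2 : j - m = j := by omega
          rw [h1, List.take_zero, hcur, h2]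
          rw [List.drop_eq_nil_of_le (by simp)]
      have htok : (PySem.List.pyGet? tokens ((j : Nat) : Int)).getD "" = tokens[j] := by
        rw [PySem.List.pyGet?_natCast, List.getElem?_eq_getElem hjn, Option.getD_some]
      have hkeyA : get_string (PySem.List.slice (cur ++ [tokens[j]]) none (some (-1)))
          = get_string cur := by
        rw [PySem.List.slice_to_neg_one, List.dropLast_concat]
      have hstep : calc_stepA depth (cur, probs) tokens[j]
          = ((tokens.take (j + 1)).drop ((j + 1) - m), calc_stepB depth tokens probs ((j : Nat) : Int)) := by
        simp only [calc_stepA, calc_stepB, if_neg hc, hW, htok, hkeyA, ← get_string_eq_join,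
          Prod.mk.injEq]
        constructor
        · rw [PySem.List.slice_from_one, hcur', List.tail_drop]
          congr 1
          omega
        · exact dict_step_eq probs (get_string cur) tokens[j]
      rw [hstep]
      have hr : (max ((m : Nat) : Int) ((j : Nat) : Int)) = (j : Int) :=
        max_eq_right (by exact_mod_cast (by omega : m ≤ j))
      rw [hr, PySem.List.pyRange_one_cons (by exact_mod_cast hjn), List.foldl_cons]
      have hr2 : ((j : Int) + 1) = max ((m : Nat) : Int) (((j + 1 : Nat)) : Int) := by
        rw [max_eq_right (by exact_mod_cast (by omega : m ≤ j + 1))]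
        push_cast; ring
      rw [hr2]
      exact ih (j + 1) _ (by omega) (by omega)

-- ===== VERDICT (by name: the statement is the Claim_ definition above) =====
theorem calculate_n_tokens_spec : Claim_equal_calculate_n_tokens := by
  intro depth tokens_list probabilities _
  unfold Spec_calculate_n_tokens calculate_n_tokens calculate_n_tokens_alt
  congr 1
  have h := loop_eq depth tokens_list (tokens_list.length) 0 (toNProbs probabilities) rfl
    (Nat.zero_le _)
  simp only [Nat.cast_zero, List.take_zero, List.drop_nil, List.drop_zero,
    Int.toNat_eq_max, max_assoc, max_self] at h
  exact h
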